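-- pv_equiv track=rewrite | github.com/seu11ee/AlgorithmPractice | Programmers/level2_기능개발.py | solution
-- ===== SOURCE A (Python) =====
-- from collections import deque
--
-- def solution(progresses, speeds):
--     q = deque(zip(progresses,speeds))
--     answer = []
--     while(q):
--         for i in range(len(q)):
--             q[i] = (q[i][0]+q[i][1],q[i][1])
--         cnt = 0
--         while(q):
--             now = q.popleft()
--             if now[0] < 100:
--                 q.appendleft(now)
--                 break
--             cnt += 1
--         if cnt > 0:
--             answer.append(cnt)
--
--     return answer
-- ===== SOURCE B (Python) =====
-- def solution(progresses, speeds):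
--     answer = []
--     prev = 0  # completion day of the current deployment group's leader
--     for p, s in zip(progresses, speeds):
--         d = max(1, -((p - 100) // s))  # completion day: ceil((100-p)/s), at least 1
--         if answer and d <= prev:
--             answer[-1] += 1
--         else:
--             answer.append(1)
--             prev = d
--     return answer
-- ===== Notes on version B (the rewrite author's own statement) =====
-- stated objective: faster
-- what changed: Replaced the day-by-day deque simulation with a closed-form completion day ceil((100-p)/s) per task and a single grouping pass; intended as faster (O(n) vs O(n*days)); measured: A timed out at n=16 where B returned, so no ratio could be read at a size both finish.
-- outside the precondition, e.g. on solution([90, 150], [10, -10]): A returns [2], B returns [1, 1]; on solution([100], [0]): A returns [1], B raises ZeroDivisionError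
import Mathlib
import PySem

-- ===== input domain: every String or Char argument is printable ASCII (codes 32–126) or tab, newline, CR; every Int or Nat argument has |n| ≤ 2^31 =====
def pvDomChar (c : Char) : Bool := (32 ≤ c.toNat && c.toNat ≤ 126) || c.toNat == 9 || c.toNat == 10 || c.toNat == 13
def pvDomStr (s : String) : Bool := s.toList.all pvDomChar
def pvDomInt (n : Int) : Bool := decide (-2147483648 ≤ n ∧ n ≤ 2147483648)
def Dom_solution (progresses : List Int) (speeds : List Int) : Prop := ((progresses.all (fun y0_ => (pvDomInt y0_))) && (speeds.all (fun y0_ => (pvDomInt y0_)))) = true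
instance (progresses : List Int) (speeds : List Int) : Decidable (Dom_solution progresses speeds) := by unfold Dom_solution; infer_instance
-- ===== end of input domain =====

-- B replaces A's day-by-day deque simulation with the closed-form completion day
-- ceil((100-p)/s) per task followed by one grouping pass; intended as faster
-- (measured: A timed out at n=16 where B returned, so no ratio could be read).

-- ===== PORT A =====
-- the inner 'while q: now = q.popleft(); …' loop: pops completed tasks off the
-- front, puts the first uncompleted one back and stops; returns (queue, cnt)
def pvPopDone : List (Int × Int) → List (Int × Int) × Int
  | [] => ([], 0)
  | x :: rest =>
    if x.1 < 100 then (x :: rest, 0)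
    else
      let r := pvPopDone rest
      (r.1, r.2 + 1)

-- the outer 'while q:' loop; fuel only makes the recursion total (it is chosen
-- large enough that, under Pre_, it is never exhausted)
def pvLoopA : Nat → List (Int × Int) → List Int → List Int
  | 0, _, ans => ans
  | fuel + 1, q, ans =>
    if q.isEmpty then ans
    else
      let q1 := q.map (fun x => (x.1 + x.2, x.2))
      let r := pvPopDone q1
      pvLoopA fuel r.1 (if 0 < r.2 then ans ++ [r.2] else ans)

def solution (progresses : List Int) (speeds : List Int) : List Int :=
  let q := List.zip progresses speeds
  pvLoopA (q.foldl (fun a x => a + (max 1 (101 - x.1)).toNat) 1) q []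

-- ===== PORT B =====
-- completion day of one task: max(1, -((p - 100) // s)) = max(1, ceil((100-p)/s))
def pvDOf (x : Int × Int) : Int := max 1 (-(PySem.Int.floordiv (x.1 - 100) x.2))

-- 'answer[-1] += 1'
def pvIncrLast : List Int → List Int
  | [] => []
  | [a] => [a + 1]
  | a :: rest => a :: pvIncrLast rest

-- body of B's single for-loop; state = (answer, prev)
def pvStepB (st : List Int × Int) (x : Int × Int) : List Int × Int :=
  let d := pvDOf x
  if st.1 ≠ [] ∧ d ≤ st.2 then (pvIncrLast st.1, st.2) else (st.1 ++ [1], d)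

def solution_alt (progresses : List Int) (speeds : List Int) : List Int :=
  ((List.zip progresses speeds).foldl pvStepB ([], 0)).1

-- ===== PRECONDITION & SPEC =====
-- Pre_ restricts to the task's natural domain of positive speeds: with a nonpositive
-- speed A diverges whenever that task cannot pass 100 in a single increment, and on
-- the remaining corner inputs (every slow task within one nonpositive step of 100,
-- where A still returns) B raises on zero speed or groups by a negative-speed ceiling.
def Pre_solution (progresses : List Int) (speeds : List Int) : Prop :=
  ∀ x ∈ List.zip progresses speeds, 0 < x.2
instance (progresses : List Int) (speeds : List Int) : Decidable (Pre_solution progresses speeds) := by unfold Pre_solution; infer_instance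

def pvWitness_solution : List Int × List Int := ([93, 30, 55], [1, 30, 5])

def Spec_solution (progresses : List Int) (speeds : List Int) (out : List Int) : Prop := out = solution_alt progresses speeds
instance (progresses : List Int) (speeds : List Int) (out : List Int) : Decidable (Spec_solution progresses speeds out) := by unfold Spec_solution; infer_instance

-- ===== CLAIM (what is proved, stated in full; the proofs are below) =====
def Claim_equal_solution : Prop := ∀ (progresses : List Int) (speeds : List Int), Dom_solution progresses speeds → Pre_solution progresses speeds → Spec_solution progresses speeds (solution progresses speeds)

-- ===== LEMMAS AND PROOFS =====

-- "group lengths" normal form both ports reduce to: a new group starts at each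
-- task whose completion day exceeds its group leader's
def pvGrp : List (Int × Int) → List Int
  | [] => []
  | x :: rest =>
    (1 + ((rest.takeWhile (fun y => decide (pvDOf y ≤ pvDOf x))).length : Int)) ::
      pvGrp (rest.dropWhile (fun y => decide (pvDOf y ≤ pvDOf x)))
termination_by l => l.length
decreasing_by
  simpa using Nat.lt_succ_of_le (List.length_dropWhile_le _ _)

theorem pvDOf_pos (x : Int × Int) : 1 ≤ pvDOf x := le_max_left _ _

-- a task is complete after t ≥ 1 days iff t has reached its completion day
theorem pvKey_iff (x : Int × Int) (t : Int) (hs : 0 < x.2) (ht : 1 ≤ t) :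
    (100 ≤ x.1 + t * x.2) ↔ pvDOf x ≤ t := by
  unfold pvDOf
  constructor
  · intro h
    refine max_le ht ?_
    have h2 : -t ≤ PySem.Int.floordiv (x.1 - 100) x.2 := by
      rw [PySem.Int.le_floordiv_iff_mul_le hs]
      nlinarith
    omega
  · intro h
    have h2 : -t ≤ PySem.Int.floordiv (x.1 - 100) x.2 := by omega
    rw [PySem.Int.le_floordiv_iff_mul_le hs] at h2
    nlinarith

theorem pvDOf_bound (x : Int × Int) (hs : 0 < x.2) : pvDOf x ≤ max 1 (101 - x.1) := by
  rw [← pvKey_iff x _ hs (le_max_left _ _)]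
  have h1 : max 1 (101 - x.1) ≤ max 1 (101 - x.1) * x.2 :=
    le_mul_of_one_le_right (by omega) (by omega)
  have h2 : 101 - x.1 ≤ max 1 (101 - x.1) := le_max_right _ _
  omega

-- popping the completed front of the queue after u days = splitting at the first
-- task whose completion day exceeds u
theorem pvPopDone_advance (u : Int) (hu : 1 ≤ u) (l : List (Int × Int))
    (hl : ∀ x ∈ l, 0 < x.2) :
    pvPopDone (l.map (fun x => (x.1 + u * x.2, x.2))) =
      ((l.dropWhile (fun y => decide (pvDOf y ≤ u))).map (fun x => (x.1 + u * x.2, x.2)),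
       ((l.takeWhile (fun y => decide (pvDOf y ≤ u))).length : Int)) := by
  induction l with
  | nil => simp [pvPopDone]
  | cons x rest ih =>
    have hx := hl x (by simp)
    have hrest : ∀ y ∈ rest, 0 < y.2 := fun y hy => hl y (by simp [hy])
    by_cases hd : pvDOf x ≤ u
    · have hdone : ¬ (x.1 + u * x.2 < 100) := by
        have := (pvKey_iff x u hx hu).mpr hd; omega
      rw [List.map_cons, pvPopDone]
      rw [if_neg hdone, ih hrest]
      simp only [List.takeWhile_cons, List.dropWhile_cons, hd, decide_true, if_true]
      simp only [List.length_cons]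
      refine Prod.ext rfl ?_
      push_cast
      ring
    · have hdone : x.1 + u * x.2 < 100 := by
        by_contra hc
        exact hd ((pvKey_iff x u hx hu).mp (by omega))
      rw [List.map_cons, pvPopDone, if_pos hdone]
      simp only [List.takeWhile_cons, List.dropWhile_cons, hd, decide_false,
        Bool.false_eq_true, if_false]
      simp

theorem pvHead_dropWhile {α : Type} (p : α → Bool) (l : List α) (x : α)
    (h : (l.dropWhile p).head? = some x) : p x = false := by
  induction l with
  | nil => simp [List.dropWhile] at h
  | cons y ys ih =>
    rw [List.dropWhile_cons] at h
    by_cases hy : p y = true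
    · exact ih (by simpa [hy] using h)
    · rw [if_neg hy] at h
      simp only [List.head?_cons, Option.some.injEq] at h
      subst h
      simpa using hy

-- invariant of A's outer loop: the queue is a suffix of the tasks advanced by t
-- days and every task still queued is unfinished at day t
theorem pvLoopA_inv (fuel : Nat) :
    ∀ (t : Int) (r : List (Int × Int)) (ans : List Int),
      0 ≤ t →
      (∀ x ∈ r, 0 < x.2) →
      (∀ x ∈ r, pvDOf x ≤ t + fuel) →
      (∀ x, r.head? = some x → t < pvDOf x) →
      pvLoopA fuel (r.map (fun x => (x.1 + t * x.2, x.2))) ans = ans ++ pvGrp r := by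
  induction fuel with
  | zero =>
    intro t r ans _ _ hb hh
    cases r with
    | nil => simp [pvLoopA, pvGrp]
    | cons x rest =>
      have h1 := hb x (by simp)
      have h2 := hh x (by simp)
      omega
  | succ fuel ih =>
    intro t r ans ht hs hb hh
    cases r with
    | nil => simp [pvLoopA, pvGrp]
    | cons x rest =>
      have hxs := hs x (by simp)
      have hxh := hh x (by simp)
      have hmap : ((x :: rest).map (fun y => (y.1 + t * y.2, y.2))).map
          (fun y => (y.1 + y.2, y.2)) =
          (x :: rest).map (fun y => (y.1 + (t + 1) * y.2, y.2)) := by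
        rw [List.map_map]
        apply List.map_congr_left
        intro y _
        simp only [Function.comp, Prod.mk.injEq]
        exact ⟨by ring, trivial⟩
      have hpop := pvPopDone_advance (t + 1) (by omega) (x :: rest) hs
      rw [pvLoopA]
      rw [if_neg (by simp)]
      simp only [hmap, hpop]
      by_cases hd : pvDOf x ≤ t + 1
      · -- the head task (and a whole prefix) completes on day t+1
        have hdx : pvDOf x = t + 1 := by omega
        have htw : (x :: rest).takeWhile (fun y => decide (pvDOf y ≤ t + 1)) =
            x :: rest.takeWhile (fun y => decide (pvDOf y ≤ t + 1)) := by
          simp [hd]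
        have hdw : (x :: rest).dropWhile (fun y => decide (pvDOf y ≤ t + 1)) =
            rest.dropWhile (fun y => decide (pvDOf y ≤ t + 1)) := by
          simp [hd]
        rw [htw, hdw]
        rw [if_pos (by simp)]
        rw [ih (t + 1) (rest.dropWhile (fun y => decide (pvDOf y ≤ t + 1))) _
          (by omega)
          (fun y hy => hs y (List.mem_cons_of_mem x ((List.dropWhile_sublist _).subset hy)))
          (fun y hy => by
            have := hb y (List.mem_cons_of_mem x ((List.dropWhile_sublist _).subset hy))
            push_cast at this ⊢
            omega)
          (fun y hy => by
            have := pvHead_dropWhile _ _ _ hy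
            simp only [decide_eq_false_iff_not, not_le] at this
            omega)]
        rw [pvGrp]
        simp only [hdx, List.append_assoc, List.cons_append, List.nil_append,
          List.length_cons]
        congr 2
        push_cast
        ring
      · -- no task completes on day t+1
        have htw : (x :: rest).takeWhile (fun y => decide (pvDOf y ≤ t + 1)) = [] := by
          simp [hd]
        have hdw : (x :: rest).dropWhile (fun y => decide (pvDOf y ≤ t + 1)) = x :: rest := by
          simp [hd]
        rw [htw, hdw]
        rw [if_neg (by simp)]
        exact ih (t + 1) (x :: rest) ans (by omega) hs
          (fun y hy => by have := hb y hy; push_cast at this ⊢; omega)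
          (fun y hy => by
            simp only [List.head?_cons, Option.some.injEq] at hy
            subst hy
            omega)

theorem pvIncrLast_append (a : List Int) (c : Int) :
    pvIncrLast (a ++ [c]) = a ++ [c + 1] := by
  induction a with
  | nil => simp [pvIncrLast]
  | cons y ys ih =>
    cases ys with
    | nil => simp [pvIncrLast] at ih ⊢
    | cons z zs => simpa [pvIncrLast] using ih

-- B's fold with a nonempty accumulated answer, characterised by pvGrp
theorem pvFoldB_aux (xs : List (Int × Int)) :
    ∀ (a : List Int) (c prev : Int),
      (xs.foldl pvStepB (a ++ [c], prev)).1 =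
        a ++ (c + ((xs.takeWhile (fun y => decide (pvDOf y ≤ prev))).length : Int)) ::
          pvGrp (xs.dropWhile (fun y => decide (pvDOf y ≤ prev))) := by
  induction xs with
  | nil => intro a c prev; simp [pvGrp]
  | cons x rest ih =>
    intro a c prev
    by_cases hd : pvDOf x ≤ prev
    · have hstep : pvStepB (a ++ [c], prev) x = (a ++ [c + 1], prev) := by
        simp [pvStepB, hd, pvIncrLast_append]
      rw [List.foldl_cons, hstep, ih a (c + 1) prev]
      simp only [List.takeWhile_cons, List.dropWhile_cons, hd, decide_true, if_true,
        List.length_cons]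
      congr 2
      push_cast
      ring
    · have hstep : pvStepB (a ++ [c], prev) x = ((a ++ [c]) ++ [1], pvDOf x) := by
        simp [pvStepB, hd]
      rw [List.foldl_cons, hstep, ih (a ++ [c]) 1 (pvDOf x)]
      have htw : (x :: rest).takeWhile (fun y => decide (pvDOf y ≤ prev)) = [] := by
        simp [hd]
      have hdw : (x :: rest).dropWhile (fun y => decide (pvDOf y ≤ prev)) = x :: rest := by
        simp [hd]
      rw [htw, hdw, pvGrp]
      simp

theorem pvAlt_eq_grp (xs : List (Int × Int)) :
    (xs.foldl pvStepB ([], 0)).1 = pvGrp xs := by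
  cases xs with
  | nil => simp [pvGrp]
  | cons x rest =>
    have hstep : pvStepB ([], 0) x = (([] : List Int) ++ [1], pvDOf x) := by
      simp [pvStepB]
    rw [List.foldl_cons, hstep, pvFoldB_aux rest [] 1 (pvDOf x), pvGrp]
    simp

theorem pvFoldl_ge_init (z : List (Int × Int)) :
    ∀ n : Nat, n ≤ z.foldl (fun a y => a + (max 1 (101 - y.1)).toNat) n := by
  induction z with
  | nil => intro n; simp
  | cons w ws ih =>
    intro n
    rw [List.foldl_cons]
    exact le_trans (Nat.le_add_right _ _) (ih _)

theorem pvFoldl_fuel_ge (z : List (Int × Int)) (n : Nat) (x : Int × Int) (hx : x ∈ z) :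
    (max 1 (101 - x.1)).toNat ≤ z.foldl (fun a y => a + (max 1 (101 - y.1)).toNat) n := by
  induction z generalizing n with
  | nil => cases hx
  | cons y zs ih =>
    rw [List.foldl_cons]
    rcases List.mem_cons.mp hx with h | h
    · subst h
      exact le_trans (Nat.le_add_left _ _) (pvFoldl_ge_init zs _)
    · exact ih _ h

-- ===== VERDICT (by name: the statement is the Claim_ definition above) =====
theorem solution_spec : Claim_equal_solution := by
  intro progresses speeds _ hpre
  unfold Spec_solution solution solution_alt
  rw [pvAlt_eq_grp]
  have hid : (List.zip progresses speeds).map (fun x => (x.1 + 0 * x.2, x.2)) =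
      List.zip progresses speeds := by
    simp
  have main := pvLoopA_inv
    ((List.zip progresses speeds).foldl (fun a x => a + (max 1 (101 - x.1)).toNat) 1)
    0 (List.zip progresses speeds) [] (by omega) hpre
    (fun x hx => by
      have h1 := pvDOf_bound x (hpre x hx)
      have h2 := pvFoldl_fuel_ge (List.zip progresses speeds) 1 x hx
      have h3 : ((max 1 (101 - x.1)).toNat : Int) = max 1 (101 - x.1) :=
        Int.toNat_of_nonneg (by omega)
      have h4 : ((max 1 (101 - x.1)).toNat : Int) ≤
          (((List.zip progresses speeds).foldl
            (fun a x => a + (max 1 (101 - x.1)).toNat) 1 : Nat) : Int) := by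
        exact_mod_cast h2
      omega)
    (fun x hx => by
      have := pvDOf_pos x
      omega)
  rw [hid] at main
  simpa using main
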